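-- pv_equiv track=rewrite | github.com/Gwo-O9/Problem-Solving | Baekjoon/9205.py | bfs
-- ===== SOURCE A (Python) =====
-- from collections import deque
--
-- def can_reach(p1, p2):
--     return abs(p1[0] - p2[0]) + abs(p1[1] - p2[1]) <= 1000
--
-- def bfs(start, end, stores):
--     q = deque([start])
--     visited = set()
--
--     while q:
--         x, y = q.popleft()
--
--         if can_reach((x, y), end):
--             return "happy"
--
--         for i in stores:
--             if i not in visited and can_reach((x, y), i):
--                 visited.add(i)
--                 q.append(i)
--
--     return "sad"
-- ===== SOURCE B (Python) =====
-- def can_reach(p1, p2):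
--     return abs(p1[0] - p2[0]) + abs(p1[1] - p2[1]) <= 1000
--
-- def bfs(start, end, stores):
--     # Dense boolean-closure (Bellman-Ford style): reach[i] = store i reachable from start
--     n = len(stores)
--     reach = [can_reach(start, s) for s in stores]
--     for _ in range(n):
--         new = [reach[i] or any(reach[j] and can_reach(stores[j], stores[i]) for j in range(n))
--                for i in range(n)]
--         if new == reach:
--             break
--         reach = new
--     if can_reach(start, end) or any(reach[i] and can_reach(stores[i], end) for i in range(n)):
--         return "happy"
--     return "sad"
-- ===== Notes on version B (the rewrite author's own statement) =====
-- stated objective: alternative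
-- what changed: Replaced the deque-based BFS with visited set by an iterated dense boolean-closure (Bellman-Ford style) over a reachability array, stopping at a fixpoint and then testing whether start or any reachable store is within 1000 of the end.
import Mathlib
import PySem

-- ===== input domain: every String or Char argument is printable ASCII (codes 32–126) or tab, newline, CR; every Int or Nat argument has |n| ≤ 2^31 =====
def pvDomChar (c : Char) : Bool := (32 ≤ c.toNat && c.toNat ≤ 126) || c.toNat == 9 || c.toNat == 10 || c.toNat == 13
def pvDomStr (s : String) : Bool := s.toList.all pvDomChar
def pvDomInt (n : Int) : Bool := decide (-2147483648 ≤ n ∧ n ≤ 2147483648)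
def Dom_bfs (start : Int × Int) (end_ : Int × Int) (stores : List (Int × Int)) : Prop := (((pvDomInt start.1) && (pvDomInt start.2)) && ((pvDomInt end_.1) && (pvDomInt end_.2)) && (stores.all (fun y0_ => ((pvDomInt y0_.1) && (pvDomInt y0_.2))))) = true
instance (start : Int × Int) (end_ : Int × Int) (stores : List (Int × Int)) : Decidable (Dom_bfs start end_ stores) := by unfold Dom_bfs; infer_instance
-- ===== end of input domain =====

-- B replaces the deque BFS by an iterated dense boolean closure over a reachability array (alternative algorithm, same results).

-- ===== PORT A =====
-- can_reach(p1, p2)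
def canReach (p1 : Int × Int) (p2 : Int × Int) : Bool :=
  decide (|p1.1 - p2.1| + |p1.2 - p2.2| ≤ 1000)

-- body of A's inner 'for i in stores' loop (one store i against popped point p)
def bfsStep (p : Int × Int) (acc : List (Int × Int) × PySem.Set (Int × Int)) (i : Int × Int) :
    List (Int × Int) × PySem.Set (Int × Int) :=
  if i ∉ acc.2 ∧ canReach p i = true then (acc.1 ++ [i], PySem.Set.add acc.2 i) else acc

-- A's 'while q' loop; the fuel only makes the recursion structural (stores.length + 1 always
-- suffices: each iteration pops one element, and every enqueue adds a new store to visited)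
def bfsLoop (end_ : Int × Int) (stores : List (Int × Int)) :
    Nat → List (Int × Int) → PySem.Set (Int × Int) → String
  | _, [], _ => "sad"
  | 0, _ :: _, _ => "sad"      -- fuel guard, never reached with the supplied fuel
  | fuel + 1, p :: q, visited =>
      if canReach p end_ = true then "happy"
      else
        let r := stores.foldl (bfsStep p) (q, visited)
        bfsLoop end_ stores fuel r.1 r.2

def bfs (start : Int × Int) (end_ : Int × Int) (stores : List (Int × Int)) : String :=
  bfsLoop end_ stores (stores.length + 1) [start] PySem.Set.empty

-- ===== PORT B =====
-- one closure round: new[i] = reach[i] or any(reach[j] and can_reach(stores[j], stores[i]))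
def stepAlt (stores : List (Int × Int)) (reach : List Bool) : List Bool :=
  (List.range stores.length).map (fun i =>
    reach.getD i false ||
      (List.range stores.length).any (fun j =>
        reach.getD j false && canReach (stores.getD j (0, 0)) (stores.getD i (0, 0))))

-- B's 'for _ in range(n)' loop with its early 'break' at the fixpoint
def altLoop (stores : List (Int × Int)) : Nat → List Bool → List Bool
  | 0, reach => reach
  | k + 1, reach =>
      let new := stepAlt stores reach
      if new = reach then reach else altLoop stores k new

def bfs_alt (start : Int × Int) (end_ : Int × Int) (stores : List (Int × Int)) : String :=
  let reach := altLoop stores stores.length (stores.map (fun s => canReach start s))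
  if canReach start end_ ||
      (List.range stores.length).any (fun i =>
        reach.getD i false && canReach (stores.getD i (0, 0)) end_) then
    "happy"
  else
    "sad"

-- ===== PRECONDITION & SPEC =====
def Spec_bfs (start : Int × Int) (end_ : Int × Int) (stores : List (Int × Int)) (out : String) : Prop := out = bfs_alt start end_ stores
instance (start : Int × Int) (end_ : Int × Int) (stores : List (Int × Int)) (out : String) : Decidable (Spec_bfs start end_ stores out) := by unfold Spec_bfs; infer_instance

-- ===== CLAIM (what is proved, stated in full; the proofs are below) =====
def Claim_equal_bfs : Prop := ∀ (start : Int × Int) (end_ : Int × Int) (stores : List (Int × Int)), Dom_bfs start end_ stores → Spec_bfs start end_ stores (bfs start end_ stores)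

-- ===== LEMMAS AND PROOFS =====

-- k-step reachability among the stores: reachB k s = "store s is reachable from start in ≤ k+1 hops"
def reachB (start : Int × Int) (stores : List (Int × Int)) : Nat → (Int × Int) → Bool
  | 0, s => decide (s ∈ stores) && canReach start s
  | k + 1, s =>
      reachB start stores k s ||
        (decide (s ∈ stores) && stores.any (fun t => reachB start stores k t && canReach t s))

-- the common specification of both programs
def Happy (start : Int × Int) (end_ : Int × Int) (stores : List (Int × Int)) : Prop :=
  canReach start end_ = true ∨
    ∃ s, (∃ k, reachB start stores k s = true) ∧ canReach s end_ = true

theorem mem_of_reachB {start : Int × Int} {stores : List (Int × Int)} :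
    ∀ {k : Nat} {s : Int × Int}, reachB start stores k s = true → s ∈ stores := by
  intro k
  induction k with
  | zero => intro s h; simp [reachB] at h; exact h.1
  | succ k ih =>
      intro s h
      rw [show reachB start stores (k + 1) s =
        (reachB start stores k s ||
          (decide (s ∈ stores) && stores.any fun t => reachB start stores k t && canReach t s))
        from rfl] at h
      simp only [Bool.or_eq_true, Bool.and_eq_true, decide_eq_true_eq] at h
      rcases h with h | ⟨h, _⟩
      · exact ih h
      · exact h

theorem reachB_mono_succ {start : Int × Int} {stores : List (Int × Int)} {k : Nat} {s : Int × Int}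
    (h : reachB start stores k s = true) : reachB start stores (k + 1) s = true := by
  rw [show reachB start stores (k + 1) s =
    (reachB start stores k s ||
      (decide (s ∈ stores) && stores.any fun t => reachB start stores k t && canReach t s))
    from rfl, h, Bool.true_or]

theorem reachB_mono {start : Int × Int} {stores : List (Int × Int)} {j k : Nat} (hjk : j ≤ k)
    {s : Int × Int} (h : reachB start stores j s = true) : reachB start stores k s = true := by
  induction hjk with
  | refl => exact h
  | step _ ih => exact reachB_mono_succ ih

-- "stable at k": round k+1 adds nothing
def StableAt (start : Int × Int) (stores : List (Int × Int)) (k : Nat) : Prop :=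
  ∀ s, reachB start stores (k + 1) s = true → reachB start stores k s = true

theorem stable_succ {start : Int × Int} {stores : List (Int × Int)} {k : Nat}
    (h : StableAt start stores k) : StableAt start stores (k + 1) := by
  intro s hs
  rw [show reachB start stores (k + 1 + 1) s =
    (reachB start stores (k + 1) s ||
      (decide (s ∈ stores) && stores.any fun t => reachB start stores (k + 1) t && canReach t s))
    from rfl] at hs
  simp only [Bool.or_eq_true, Bool.and_eq_true, List.any_eq_true, decide_eq_true_eq] at hs
  rcases hs with hs | ⟨hm, t, htm, ht, hcr⟩
  · exact hs
  · rw [show reachB start stores (k + 1) s =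
      (reachB start stores k s ||
        (decide (s ∈ stores) && stores.any fun t => reachB start stores k t && canReach t s))
      from rfl]
    simp only [Bool.or_eq_true, Bool.and_eq_true, List.any_eq_true, decide_eq_true_eq]
    right
    exact ⟨hm, t, htm, h t ht, hcr⟩

theorem stable_ge {start : Int × Int} {stores : List (Int × Int)} {k : Nat}
    (h : StableAt start stores k) : ∀ m, k ≤ m → ∀ s, reachB start stores m s = true →
      reachB start stores k s = true := by
  have up : ∀ m, k ≤ m → StableAt start stores m := by
    intro m
    induction m with
    | zero => intro h0; have : k = 0 := Nat.le_zero.mp h0; exact this ▸ h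
    | succ m ih =>
        intro hk
        by_cases hkm : k ≤ m
        · exact stable_succ (ih hkm)
        · have : k = m + 1 := by omega
          exact this ▸ h
  intro m
  induction m with
  | zero => intro h0 s hs; have : k = 0 := Nat.le_zero.mp h0; exact this ▸ hs
  | succ m ih =>
      intro hk s hs
      by_cases hkm : k ≤ m
      · exact ih hkm s (up m hkm s hs)
      · have : k = m + 1 := by omega
        exact this ▸ hs

-- saturation: everything ever reachable is reachable within stores.length rounds
theorem reachB_sat {start : Int × Int} {stores : List (Int × Int)} {k : Nat} {s : Int × Int}
    (h : reachB start stores k s = true) : reachB start stores stores.length s = true := by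
  set F : Nat → Finset (Int × Int) :=
    fun m => stores.toFinset.filter (fun t => reachB start stores m t = true) with hF
  have key : ∀ m : Nat, (∃ j ≤ m, StableAt start stores j) ∨ m + 1 ≤ (F m).card := by
    intro m
    induction m with
    | zero =>
        by_cases h0 : StableAt start stores 0
        · exact Or.inl ⟨0, le_refl 0, h0⟩
        · right
          rw [StableAt] at h0
          push Not at h0
          obtain ⟨x, hx1, hx0⟩ := h0
          rw [show reachB start stores (0 + 1) x =
            (reachB start stores 0 x ||
              (decide (x ∈ stores) && stores.any fun t => reachB start stores 0 t && canReach t x))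
            from rfl] at hx1
          simp only [Bool.or_eq_true, Bool.and_eq_true, List.any_eq_true, decide_eq_true_eq] at hx1
          rcases hx1 with hx1 | ⟨_, t, _, ht, _⟩
          · exact absurd hx1 hx0
          · have : t ∈ F 0 := by
              rw [hF]; simp only [Finset.mem_filter, List.mem_toFinset]
              exact ⟨mem_of_reachB ht, ht⟩
            have := Finset.card_pos.mpr ⟨t, this⟩
            omega
    | succ m ih =>
        rcases ih with ⟨j, hj, hst⟩ | hcard
        · exact Or.inl ⟨j, Nat.le_succ_of_le hj, hst⟩
        · by_cases hstm : StableAt start stores m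
          · exact Or.inl ⟨m, Nat.le_succ m, hstm⟩
          · right
            rw [StableAt] at hstm
            push Not at hstm
            obtain ⟨x, hx1, hx0⟩ := hstm
            have hsub : F m ⊂ F (m + 1) := by
              constructor
              · intro y hy
                rw [hF] at hy ⊢
                simp only [Finset.mem_filter, List.mem_toFinset] at hy ⊢
                exact ⟨hy.1, reachB_mono_succ hy.2⟩
              · intro hcon
                have hx : x ∈ F (m + 1) := by
                  rw [hF]; simp only [Finset.mem_filter, List.mem_toFinset]
                  exact ⟨mem_of_reachB hx1, hx1⟩
                have := hcon hx
                rw [hF] at this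
                simp only [Finset.mem_filter, List.mem_toFinset] at this
                exact hx0 this.2
            have := Finset.card_lt_card hsub
            omega
  rcases key stores.length with ⟨j, hj, hst⟩ | hcard
  · have hjs : reachB start stores j s = true := by
      by_cases hkj : k ≤ j
      · exact reachB_mono hkj h
      · exact stable_ge hst k (by omega) s h
    exact reachB_mono hj hjs
  · have h1 : (F stores.length).card ≤ stores.toFinset.card := Finset.card_filter_le _ _
    have h2 : stores.toFinset.card ≤ stores.length := stores.toFinset_card_le
    omega

-- ---------- B-side characterisation ----------

theorem altLoop_eq_iterate (stores : List (Int × Int)) :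
    ∀ (k : Nat) (r : List Bool), altLoop stores k r = (stepAlt stores)^[k] r := by
  intro k
  induction k with
  | zero => intro r; rfl
  | succ k ih =>
      intro r
      rw [show altLoop stores (k + 1) r =
        (if stepAlt stores r = r then r else altLoop stores k (stepAlt stores r)) from rfl,
        Function.iterate_succ_apply]
      by_cases h : stepAlt stores r = r
      · rw [if_pos h, h, Function.iterate_fixed h]
      · rw [if_neg h, ih]

theorem iterate_spec (start : Int × Int) (stores : List (Int × Int)) :
    ∀ k : Nat,
      ((stepAlt stores)^[k] (stores.map (fun s => canReach start s))).length = stores.length ∧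
      ∀ i (h : i < stores.length),
        ((stepAlt stores)^[k] (stores.map (fun s => canReach start s))).getD i false =
          reachB start stores k stores[i] := by
  intro k
  induction k with
  | zero =>
      refine ⟨by simp, ?_⟩
      intro i h
      rw [Function.iterate_zero_apply, List.getD_eq_getElem _ _ (by simpa using h)]
      simp [reachB, List.getElem_mem]
  | succ k ih =>
      obtain ⟨ihlen, ihval⟩ := ih
      rw [Function.iterate_succ_apply']
      refine ⟨by simp [stepAlt], ?_⟩
      intro i h
      rw [show stepAlt stores ((stepAlt stores)^[k] (stores.map (fun s => canReach start s))) =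
        (List.range stores.length).map (fun i =>
          ((stepAlt stores)^[k] (stores.map (fun s => canReach start s))).getD i false ||
            (List.range stores.length).any (fun j =>
              ((stepAlt stores)^[k] (stores.map (fun s => canReach start s))).getD j false &&
                canReach (stores.getD j (0, 0)) (stores.getD i (0, 0)))) from rfl]
      rw [List.getD_eq_getElem _ _ (by simpa using h)]
      simp only [List.getElem_map, List.getElem_range]
      rw [ihval i h, show stores.getD i (0, 0) = stores[i] from List.getD_eq_getElem _ _ h]
      rw [show reachB start stores (k + 1) stores[i] =
        (reachB start stores k stores[i] ||
          (decide (stores[i] ∈ stores) &&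
            stores.any fun t => reachB start stores k t && canReach t stores[i])) from rfl]
      congr 1
      rw [Bool.eq_iff_iff]
      simp only [List.any_eq_true, List.mem_range, Bool.and_eq_true, decide_eq_true_eq]
      constructor
      · rintro ⟨j, hj, hjr, hjc⟩
        rw [ihval j hj] at hjr
        rw [show stores.getD j (0, 0) = stores[j] from List.getD_eq_getElem _ _ hj] at hjc
        exact ⟨List.getElem_mem h, stores[j], List.getElem_mem hj, hjr, hjc⟩
      · rintro ⟨_, t, htm, htr, htc⟩
        obtain ⟨j, hj, hje⟩ := List.mem_iff_getElem.mp htm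
        refine ⟨j, hj, ?_, ?_⟩
        · rw [ihval j hj, hje]; exact htr
        · rw [show stores.getD j (0, 0) = stores[j] from List.getD_eq_getElem _ _ hj, hje]
          exact htc

theorem alt_happy_iff (start end_ : Int × Int) (stores : List (Int × Int)) :
    bfs_alt start end_ stores = "happy" ↔ Happy start end_ stores := by
  have e : bfs_alt start end_ stores =
      (if (canReach start end_ ||
          (List.range stores.length).any (fun i =>
            ((stepAlt stores)^[stores.length] (stores.map (fun s => canReach start s))).getD i false &&
              canReach (stores.getD i (0, 0)) end_)) = true then "happy" else "sad") := by
    unfold bfs_alt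
    rw [altLoop_eq_iterate]
  rw [e]
  have key : (canReach start end_ ||
      (List.range stores.length).any (fun i =>
        ((stepAlt stores)^[stores.length] (stores.map (fun s => canReach start s))).getD i false &&
          canReach (stores.getD i (0, 0)) end_)) = true ↔ Happy start end_ stores := by
    simp only [Bool.or_eq_true, List.any_eq_true, List.mem_range, Bool.and_eq_true]
    constructor
    · rintro (hcr | ⟨i, hi, hri, hci⟩)
      · exact Or.inl hcr
      · rw [(iterate_spec start stores stores.length).2 i hi] at hri
        rw [show stores.getD i (0, 0) = stores[i] from List.getD_eq_getElem _ _ hi] at hci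
        exact Or.inr ⟨stores[i], ⟨stores.length, hri⟩, hci⟩
    · rintro (hcr | ⟨s, ⟨k, hk⟩, hcr⟩)
      · exact Or.inl hcr
      · right
        obtain ⟨j, hj, hje⟩ := List.mem_iff_getElem.mp (mem_of_reachB hk)
        refine ⟨j, hj, ?_, ?_⟩
        · rw [(iterate_spec start stores stores.length).2 j hj, hje]
          exact reachB_sat hk
        · rw [show stores.getD j (0, 0) = stores[j] from List.getD_eq_getElem _ _ hj, hje]
          exact hcr
  split_ifs with hc
  · simp only [true_iff]
    exact key.mp hc
  · constructor
    · intro habs; exact absurd habs (by decide)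
    · intro hh; exact absurd (key.mpr hh) hc

theorem alt_two_valued (start end_ : Int × Int) (stores : List (Int × Int)) :
    bfs_alt start end_ stores = "happy" ∨ bfs_alt start end_ stores = "sad" := by
  have h : ∀ (c : Prop) [Decidable c] (a b : String),
      (if c then a else b) = a ∨ (if c then a else b) = b := by
    intro c _ a b
    split_ifs <;> simp
  exact h _ _ _

-- ---------- A-side characterisation ----------

theorem fold_spec (p : Int × Int) :
    ∀ (l : List (Int × Int)) (q : List (Int × Int)) (v : PySem.Set (Int × Int)),
      ∃ L : List (Int × Int),
        (l.foldl (bfsStep p) (q, v)).1 = q ++ L ∧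
        (∀ x, x ∈ (l.foldl (bfsStep p) (q, v)).2 ↔ x ∈ v ∨ x ∈ L) ∧
        (∀ x ∈ L, x ∈ l ∧ canReach p x = true ∧ x ∉ v) ∧
        L.Nodup ∧
        (∀ s ∈ l, canReach p s = true → s ∈ (l.foldl (bfsStep p) (q, v)).2) := by
  intro l
  induction l with
  | nil =>
      intro q v
      exact ⟨[], by simp, by simp, by simp, List.nodup_nil, by simp⟩
  | cons i l ih =>
      intro q v
      rw [List.foldl_cons]
      by_cases hcond : i ∉ v ∧ canReach p i = true
      · rw [show bfsStep p (q, v) i = (q ++ [i], PySem.Set.add v i) from by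
          unfold bfsStep; rw [if_pos hcond]]
        obtain ⟨L', h1, h2, h3, h4, h5⟩ := ih (q ++ [i]) (PySem.Set.add v i)
        refine ⟨i :: L', ?_, ?_, ?_, ?_, ?_⟩
        · rw [h1, List.append_assoc]; rfl
        · intro x
          rw [h2 x, PySem.Set.mem_add]
          simp only [List.mem_cons]
          tauto
        · intro x hx
          rcases List.mem_cons.mp hx with rfl | hx'
          · exact ⟨by simp, hcond.2, hcond.1⟩
          · obtain ⟨ha, hb, hc⟩ := h3 x hx'
            exact ⟨List.mem_cons_of_mem _ ha, hb,
              fun hxv => hc ((PySem.Set.mem_add _ _ _).mpr (Or.inl hxv))⟩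
        · refine List.nodup_cons.mpr ⟨?_, h4⟩
          intro hiL
          exact (h3 i hiL).2.2 ((PySem.Set.mem_add _ _ _).mpr (Or.inr rfl))
        · intro s hs hcr
          rcases List.mem_cons.mp hs with rfl | hs'
          · exact (h2 s).mpr (Or.inl ((PySem.Set.mem_add _ _ _).mpr (Or.inr rfl)))
          · exact h5 s hs' hcr
      · rw [show bfsStep p (q, v) i = (q, v) from by
          unfold bfsStep; rw [if_neg hcond]]
        obtain ⟨L, h1, h2, h3, h4, h5⟩ := ih q v
        refine ⟨L, h1, h2,
          fun x hx => ⟨List.mem_cons_of_mem _ (h3 x hx).1, (h3 x hx).2⟩, h4, ?_⟩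
        intro s hs hcr
        rcases List.mem_cons.mp hs with rfl | hs'
        · have hsv : s ∈ v := by
            by_contra hnv
            exact hcond ⟨hnv, hcr⟩
          exact (h2 s).mpr (Or.inl hsv)
        · exact h5 s hs' hcr

theorem two_valued (end_ : Int × Int) (stores : List (Int × Int)) :
    ∀ (fuel : Nat) (q : List (Int × Int)) (v : PySem.Set (Int × Int)),
      bfsLoop end_ stores fuel q v = "happy" ∨ bfsLoop end_ stores fuel q v = "sad" := by
  intro fuel
  induction fuel with
  | zero => intro q v; cases q <;> simp [bfsLoop]
  | succ fuel ih =>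
      intro q v
      cases q with
      | nil => simp [bfsLoop]
      | cons p q' =>
          rw [show bfsLoop end_ stores (fuel + 1) (p :: q') v =
            (if canReach p end_ = true then "happy"
             else bfsLoop end_ stores fuel ((stores.foldl (bfsStep p) (q', v)).1)
               ((stores.foldl (bfsStep p) (q', v)).2)) from rfl]
          by_cases h : canReach p end_ = true
          · rw [if_pos h]; left; rfl
          · rw [if_neg h]; exact ih _ _

-- once the queue is empty: everything reachable is in v and nothing in D reaches the end
theorem final_state (start end_ : Int × Int) (stores : List (Int × Int))
    (v : PySem.Set (Int × Int)) (D : (Int × Int) → Prop)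
    (hD1 : ∀ p, D p → canReach p end_ = false)
    (hD2 : ∀ p, D p → ∀ s ∈ stores, canReach p s = true → s ∈ v)
    (hvD : ∀ x ∈ v, D x) (hs : D start) : ¬ Happy start end_ stores := by
  have key : ∀ (k : Nat) (s : Int × Int), reachB start stores k s = true → s ∈ v := by
    intro k
    induction k with
    | zero =>
        intro s hsb
        simp only [reachB, Bool.and_eq_true, decide_eq_true_eq] at hsb
        exact hD2 start hs s hsb.1 hsb.2
    | succ k ih =>
        intro s hsb
        rw [show reachB start stores (k + 1) s =
          (reachB start stores k s ||
            (decide (s ∈ stores) && stores.any fun t => reachB start stores k t && canReach t s))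
          from rfl] at hsb
        simp only [Bool.or_eq_true, Bool.and_eq_true, List.any_eq_true, decide_eq_true_eq] at hsb
        rcases hsb with hsb | ⟨hm, t, htm, ht, hcr⟩
        · exact ih s hsb
        · exact hD2 t (hvD t (ih t ht)) s hm hcr
  intro hh
  rcases hh with hcr | ⟨s, ⟨k, hk⟩, hcr⟩
  · simp [hD1 start hs] at hcr
  · have hsv := hvD s (key k s hk)
    simp [hD1 s hsv] at hcr

theorem happy_sound (start end_ : Int × Int) (stores : List (Int × Int)) :
    ∀ (fuel : Nat) (q : List (Int × Int)) (v : PySem.Set (Int × Int)),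
      (∀ p ∈ q, p = start ∨ ∃ k, reachB start stores k p = true) →
      bfsLoop end_ stores fuel q v = "happy" → Happy start end_ stores := by
  intro fuel
  induction fuel with
  | zero =>
      intro q v hq hres
      cases q with
      | nil => simp [bfsLoop] at hres
      | cons p q' => simp [bfsLoop] at hres
  | succ fuel ih =>
      intro q v hq hres
      cases q with
      | nil => simp [bfsLoop] at hres
      | cons p q' =>
          rw [show bfsLoop end_ stores (fuel + 1) (p :: q') v =
            (if canReach p end_ = true then "happy"
             else bfsLoop end_ stores fuel ((stores.foldl (bfsStep p) (q', v)).1)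
               ((stores.foldl (bfsStep p) (q', v)).2)) from rfl] at hres
          by_cases hc : canReach p end_ = true
          · rcases hq p (by simp) with rfl | ⟨k, hk⟩
            · exact Or.inl hc
            · exact Or.inr ⟨p, ⟨k, hk⟩, hc⟩
          · rw [if_neg hc] at hres
            obtain ⟨L, h1, h2, h3, h4, h5⟩ := fold_spec p stores q' v
            apply ih _ ((stores.foldl (bfsStep p) (q', v)).2) ?_ hres
            intro x hx
            rw [h1] at hx
            rcases List.mem_append.mp hx with hx' | hxL
            · exact hq x (List.mem_cons_of_mem _ hx')
            · obtain ⟨hxs, hxcr, _⟩ := h3 x hxL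
              right
              rcases hq p (by simp) with rfl | ⟨k, hk⟩
              · exact ⟨0, by simp [reachB, hxs, hxcr]⟩
              · refine ⟨k + 1, ?_⟩
                rw [show reachB start stores (k + 1) x =
                  (reachB start stores k x ||
                    (decide (x ∈ stores) &&
                      stores.any fun t => reachB start stores k t && canReach t x)) from rfl]
                simp only [Bool.or_eq_true, Bool.and_eq_true, List.any_eq_true,
                  decide_eq_true_eq]
                right
                exact ⟨hxs, p, mem_of_reachB hk, hk, hxcr⟩

theorem sad_correct (start end_ : Int × Int) (stores : List (Int × Int)) :
    ∀ (fuel : Nat) (q : List (Int × Int)) (v : PySem.Set (Int × Int)) (D : (Int × Int) → Prop),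
      q.length + (stores.toFinset \ v.toFinset).card ≤ fuel →
      (∀ p, D p → canReach p end_ = false) →
      (∀ p, D p → ∀ s ∈ stores, canReach p s = true → s ∈ v) →
      (∀ x ∈ v, D x ∨ x ∈ q) →
      (D start ∨ start ∈ q) →
      bfsLoop end_ stores fuel q v = "sad" → ¬ Happy start end_ stores := by
  intro fuel
  induction fuel with
  | zero =>
      intro q v D hfuel hD1 hD2 hv hstart hres
      cases q with
      | nil =>
          exact final_state start end_ stores v D hD1 hD2
            (fun x hx => (hv x hx).resolve_right (by simp))
            (hstart.resolve_right (by simp))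
      | cons p q' =>
          simp only [List.length_cons] at hfuel
          omega
  | succ fuel ih =>
      intro q v D hfuel hD1 hD2 hv hstart hres
      cases q with
      | nil =>
          exact final_state start end_ stores v D hD1 hD2
            (fun x hx => (hv x hx).resolve_right (by simp))
            (hstart.resolve_right (by simp))
      | cons p q' =>
          rw [show bfsLoop end_ stores (fuel + 1) (p :: q') v =
            (if canReach p end_ = true then "happy"
             else bfsLoop end_ stores fuel ((stores.foldl (bfsStep p) (q', v)).1)
               ((stores.foldl (bfsStep p) (q', v)).2)) from rfl] at hres
          by_cases hc : canReach p end_ = true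
          · rw [if_pos hc] at hres
            simp at hres
          · rw [if_neg hc] at hres
            have hcf : canReach p end_ = false := by
              cases hcb : canReach p end_ <;> simp_all
            obtain ⟨L, h1, h2, h3, h4, h5⟩ := fold_spec p stores q' v
            refine ih ((stores.foldl (bfsStep p) (q', v)).1)
              ((stores.foldl (bfsStep p) (q', v)).2) (fun x => D x ∨ x = p)
              ?_ ?_ ?_ ?_ ?_ hres
            · -- fuel bound
              have hlen : (stores.foldl (bfsStep p) (q', v)).1.length = q'.length + L.length := by
                rw [h1]; simp
              have hdisj : Disjoint
                  (stores.toFinset \ (stores.foldl (bfsStep p) (q', v)).2.toFinset)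
                  L.toFinset := by
                rw [Finset.disjoint_right]
                intro x hx hmem
                rw [List.mem_toFinset] at hx
                exact (Finset.mem_sdiff.mp hmem).2
                  (List.mem_toFinset.mpr ((h2 x).mpr (Or.inr hx)))
              have hsub2 : (stores.toFinset \ (stores.foldl (bfsStep p) (q', v)).2.toFinset) ∪
                  L.toFinset ⊆ stores.toFinset \ v.toFinset := by
                intro x hx
                rcases Finset.mem_union.mp hx with hx' | hx'
                · rw [Finset.mem_sdiff] at hx' ⊢
                  refine ⟨hx'.1, fun hxv => hx'.2 ?_⟩
                  rw [List.mem_toFinset] at hxv ⊢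
                  exact (h2 x).mpr (Or.inl hxv)
                · rw [List.mem_toFinset] at hx'
                  obtain ⟨ha, _, hcv⟩ := h3 x hx'
                  rw [Finset.mem_sdiff, List.mem_toFinset, List.mem_toFinset]
                  exact ⟨ha, hcv⟩
              have hcard := Finset.card_le_card hsub2
              rw [Finset.card_union_of_disjoint hdisj,
                List.toFinset_card_of_nodup h4] at hcard
              simp only [List.length_cons] at hfuel
              rw [hlen]
              omega
            · intro x hx
              rcases hx with hx | rfl
              · exact hD1 x hx
              · exact hcf
            · intro x hx s hsm hscr
              rcases hx with hx | rfl
              · exact (h2 s).mpr (Or.inl (hD2 x hx s hsm hscr))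
              · exact h5 s hsm hscr
            · intro x hx
              rcases (h2 x).mp hx with hxv | hxL
              · rcases hv x hxv with hD | hq
                · exact Or.inl (Or.inl hD)
                · rcases List.mem_cons.mp hq with rfl | hq'
                  · exact Or.inl (Or.inr rfl)
                  · exact Or.inr (by rw [h1]; exact List.mem_append.mpr (Or.inl hq'))
              · exact Or.inr (by rw [h1]; exact List.mem_append.mpr (Or.inr hxL))
            · rcases hstart with hD | hq
              · exact Or.inl (Or.inl hD)
              · rcases List.mem_cons.mp hq with rfl | hq'
                · exact Or.inl (Or.inr rfl)
                · exact Or.inr (by rw [h1]; exact List.mem_append.mpr (Or.inl hq'))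

theorem bfs_happy_iff (start end_ : Int × Int) (stores : List (Int × Int)) :
    bfs start end_ stores = "happy" ↔ Happy start end_ stores := by
  constructor
  · intro h
    exact happy_sound start end_ stores (stores.length + 1) [start] PySem.Set.empty
      (fun p hp => Or.inl (List.mem_singleton.mp hp)) h
  · intro h
    rcases two_valued end_ stores (stores.length + 1) [start] PySem.Set.empty with h1 | h1
    · exact h1
    · exfalso
      refine sad_correct start end_ stores (stores.length + 1) [start] PySem.Set.empty
        (fun _ => False) ?_ (fun _ hf => hf.elim) (fun _ hf => hf.elim)
        (fun x hx => absurd hx (by simp [PySem.Set.empty])) (Or.inr (by simp)) h1 h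
      have hS : (PySem.Set.empty : PySem.Set (Int × Int)).toFinset = ∅ := rfl
      rw [hS, Finset.sdiff_empty]
      have := stores.toFinset_card_le
      simp only [List.length_singleton]
      omega

-- ===== VERDICT (by name: the statement is the Claim_ definition above) =====
theorem bfs_spec : Claim_equal_bfs := by
  intro start end_ stores _
  show bfs start end_ stores = bfs_alt start end_ stores
  by_cases h : Happy start end_ stores
  · rw [(bfs_happy_iff start end_ stores).mpr h, (alt_happy_iff start end_ stores).mpr h]
  · have ha : bfs start end_ stores = "sad" := by
      rcases two_valued end_ stores (stores.length + 1) [start] PySem.Set.empty with h1 | h1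
      · exact absurd ((bfs_happy_iff start end_ stores).mp h1) h
      · exact h1
    have hb : bfs_alt start end_ stores = "sad" := by
      rcases alt_two_valued start end_ stores with h1 | h1
      · exact absurd ((alt_happy_iff start end_ stores).mp h1) h
      · exact h1
    rw [ha, hb]
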